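-- pv_equiv track=rewrite | github.com/SteamonAP/Java-Practice | APP Week 13/Q2.py | nfa_accepts
-- ===== SOURCE A (Python) =====
-- def is_accepting_state(current_state):
--     return current_state in [2, 4]
--
-- def nfa_accepts(input_string):
--     current_state = 0
--
--     for char in input_string:
--         if current_state == 0 and char == 'a':
--             current_state = 1
--         elif current_state == 0 and char == 'b':
--             current_state = 3
--         elif current_state == 1 and char == 'b':
--             current_state = 2
--         elif current_state == 2:
--             break  # Accept if "ab"
--         elif current_state == 3 and char == 'a':
--             current_state = 4
--         elif current_state == 4:
--             break  # Accept if "ba"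
--         else:
--             return False  # Invalid transition
--
--     return is_accepting_state(current_state)
-- ===== SOURCE B (Python) =====
-- def nfa_accepts(input_string):
--     it = iter(input_string)
--     return (next(it, None), next(it, None)) in (('a', 'b'), ('b', 'a'))
-- ===== Notes on version B (the rewrite author's own statement) =====
-- stated objective: simpler
-- what changed: Replaced the per-character DFA state loop by a closed-form test: pull the first two characters off an iterator and check the pair equals ('a','b') or ('b','a'), since the DFA decides after at most two steps.
import Mathlib
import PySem

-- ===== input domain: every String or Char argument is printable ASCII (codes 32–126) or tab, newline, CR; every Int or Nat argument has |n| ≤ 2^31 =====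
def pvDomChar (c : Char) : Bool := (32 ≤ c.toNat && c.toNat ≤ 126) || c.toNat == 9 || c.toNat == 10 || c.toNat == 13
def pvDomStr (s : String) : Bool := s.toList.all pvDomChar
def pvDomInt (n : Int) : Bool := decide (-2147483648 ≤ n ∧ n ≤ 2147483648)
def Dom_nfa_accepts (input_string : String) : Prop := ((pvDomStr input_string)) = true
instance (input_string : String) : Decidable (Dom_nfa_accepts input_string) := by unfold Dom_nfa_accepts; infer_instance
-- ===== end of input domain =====

-- ===== PORT A =====
-- Literal transliteration of A's DFA loop: structural recursion carrying current_state.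
def nfaLoopA : List Char → Int → Bool
  | [], s => s == 2 || s == 4            -- loop ends: return is_accepting_state(current_state)
  | c :: rest, s =>
    if s == 0 && c == 'a' then nfaLoopA rest 1
    else if s == 0 && c == 'b' then nfaLoopA rest 3
    else if s == 1 && c == 'b' then nfaLoopA rest 2
    else if s == 2 then s == 2 || s == 4  -- break
    else if s == 3 && c == 'a' then nfaLoopA rest 4
    else if s == 4 then s == 2 || s == 4  -- break
    else false                            -- invalid transition

def nfa_accepts (input_string : String) : Bool :=
  nfaLoopA input_string.toList 0

-- ===== PORT B =====
-- B pulls the first two characters (next(it, None) twice) and tests the pair.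
def nfa_accepts_alt (input_string : String) : Bool :=
  match input_string.toList with
  | a :: b :: _ => (a == 'a' && b == 'b') || (a == 'b' && b == 'a')
  | _ => false

-- ===== PRECONDITION & SPEC =====
def Spec_nfa_accepts (input_string : String) (out : Bool) : Prop := out = nfa_accepts_alt input_string
instance (input_string : String) (out : Bool) : Decidable (Spec_nfa_accepts input_string out) := by unfold Spec_nfa_accepts; infer_instance

-- ===== CLAIM (what is proved, stated in full; the proofs are below) =====
def Claim_equal_nfa_accepts : Prop := ∀ (input_string : String), Dom_nfa_accepts input_string → Spec_nfa_accepts input_string (nfa_accepts input_string)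

-- ===== LEMMAS AND PROOFS =====
theorem nfaLoopA_two (l : List Char) : nfaLoopA l 2 = true := by
  cases l <;> simp [nfaLoopA]

theorem nfaLoopA_four (l : List Char) : nfaLoopA l 4 = true := by
  cases l <;> simp [nfaLoopA]

-- ===== VERDICT (by name: the statement is the Claim_ definition above) =====
theorem nfa_accepts_spec : Claim_equal_nfa_accepts := by
  intro s _
  unfold Spec_nfa_accepts nfa_accepts nfa_accepts_alt
  match h : s.toList with
  | [] => simp [nfaLoopA]
  | [c] =>
    by_cases ha : c = 'a' <;> by_cases hb : c = 'b' <;>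
      simp [nfaLoopA, ha, hb]
  | c :: d :: rest =>
    by_cases ha : c = 'a' <;> by_cases hb : c = 'b' <;>
      by_cases da : d = 'a' <;> by_cases db : d = 'b' <;>
        simp [nfaLoopA, ha, hb, da, db, nfaLoopA_two, nfaLoopA_four]
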